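-- pv_equiv track=rewrite | github.com/leftshiftone/connector-examples | example-2.1/helpers.py | get_kb_documents_by_error
-- ===== SOURCE A (Python) =====
-- from typing import List, Dict
--
-- def get_kb_documents_by_error(kb_documents: List[dict]) -> Dict[str, List[dict]]:
--     error_shorthands = {}
--     for kb_document in kb_documents:
--         short = kb_document["status_message"][:25]
--         if short in error_shorthands.keys():
--             error_shorthands[short].append(kb_document)
--         else:
--             error_shorthands.update({short: [kb_document]})
--     return error_shorthands
-- ===== SOURCE B (Python) =====
-- def get_kb_documents_by_error(kb_documents):
--     # Two-pass grouping: collect the distinct 25-char prefixes in first-occurrence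
--     # order, then build each group with a single filter over the input.
--     keys = []
--     for kb_document in kb_documents:
--         short = kb_document["status_message"][:25]
--         if short not in keys:
--             keys.append(short)
--     return {short: [d for d in kb_documents if d["status_message"][:25] == short]
--             for short in keys}
-- ===== Notes on version B (the rewrite author's own statement) =====
-- stated objective: alternative
-- what changed: Replaces A's single-pass dict-building loop (membership test, in-place append or insert) with a two-phase algorithm: first collect the distinct 25-char prefixes in first-occurrence order, then build the result by filtering the whole input once per key.
import Mathlib
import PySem

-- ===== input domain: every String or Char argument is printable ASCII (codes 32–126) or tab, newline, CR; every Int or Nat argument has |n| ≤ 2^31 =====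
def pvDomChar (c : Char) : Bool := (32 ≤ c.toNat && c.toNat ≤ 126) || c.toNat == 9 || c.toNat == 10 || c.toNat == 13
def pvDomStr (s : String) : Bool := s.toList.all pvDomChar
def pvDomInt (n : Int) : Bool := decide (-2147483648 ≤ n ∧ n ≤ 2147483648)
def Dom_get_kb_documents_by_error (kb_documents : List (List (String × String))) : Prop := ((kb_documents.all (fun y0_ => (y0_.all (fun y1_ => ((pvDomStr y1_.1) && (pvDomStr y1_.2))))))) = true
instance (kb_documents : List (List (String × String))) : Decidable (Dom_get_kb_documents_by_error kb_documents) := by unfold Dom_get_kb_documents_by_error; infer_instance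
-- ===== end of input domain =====

-- B groups by first collecting the distinct 25-char prefixes, then filtering the input once per
-- key, instead of A's single-pass dict-building loop (objective: alternative decomposition).

-- ===== PORT A =====
-- kb_document["status_message"][:25]; the total getD "" is only relied on under
-- Pre_ (every document carries the key "status_message"); shared by both ports
-- because both Pythons contain this very expression.
def shortOf (doc : List (String × String)) : String :=
  PySem.Str.slice ((PySem.Dict.mk doc).getD "status_message" "") none (some 25)

def get_kb_documents_by_error (kb_documents : List (List (String × String))) : List (String × List (List (String × String))) :=
  (kb_documents.foldl (fun error_shorthands kb_document =>
      let short := shortOf kb_document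
      if error_shorthands.contains short then
        error_shorthands.modify short [] (· ++ [kb_document])   -- error_shorthands[short].append(...)
      else
        error_shorthands.insert short [kb_document])            -- update({short: [kb_document]})
    PySem.Dict.empty).items

-- ===== PORT B =====
def get_kb_documents_by_error_alt (kb_documents : List (List (String × String))) : List (String × List (List (String × String))) :=
  let keys := kb_documents.foldl (fun ks kb_document =>
      PySem.Set.add ks (shortOf kb_document)) ([] : PySem.Set String)
  keys.map (fun short => (short, kb_documents.filter (fun d => shortOf d == short)))

-- ===== PRECONDITION & SPEC =====
-- Pre_ excludes exactly the inputs where Python A raises KeyError: a document without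
-- the key "status_message".
def Pre_get_kb_documents_by_error (kb_documents : List (List (String × String))) : Prop :=
  ∀ doc ∈ kb_documents, (PySem.Dict.mk doc).contains "status_message" = true
instance (kb_documents : List (List (String × String))) : Decidable (Pre_get_kb_documents_by_error kb_documents) := by unfold Pre_get_kb_documents_by_error; infer_instance

def pvWitness_get_kb_documents_by_error : (List (List (String × String))) :=
  [[("status_message", "boom: connection refused by upstream"), ("id", "1")],
   [("status_message", "boom: connection refused again"), ("id", "2")],
   [("status_message", "ok"), ("id", "3")]]

def Spec_get_kb_documents_by_error (kb_documents : List (List (String × String))) (out : List (String × List (List (String × String)))) : Prop := out = get_kb_documents_by_error_alt kb_documents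
instance (kb_documents : List (List (String × String))) (out : List (String × List (List (String × String)))) : Decidable (Spec_get_kb_documents_by_error kb_documents out) := by unfold Spec_get_kb_documents_by_error; infer_instance

-- ===== CLAIM (what is proved, stated in full; the proofs are below) =====
def Claim_equal_get_kb_documents_by_error : Prop := ∀ (kb_documents : List (List (String × String))), Dom_get_kb_documents_by_error kb_documents → Pre_get_kb_documents_by_error kb_documents → Spec_get_kb_documents_by_error kb_documents (get_kb_documents_by_error kb_documents)

-- ===== LEMMAS AND PROOFS =====

-- A's branch (append if present, insert a fresh singleton otherwise) is one dict modify.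
theorem step_eq_modify (d : PySem.Dict String (List (List (String × String)))) (s : String)
    (x : List (String × String)) :
    (if d.contains s then d.modify s [] (· ++ [x]) else d.insert s [x]) =
      d.modify s [] (· ++ [x]) := by
  by_cases h : d.contains s = true
  · simp [h]
  · have hf : d.contains s = false := by simpa using h
    simp [h, PySem.Dict.modify, PySem.Dict.getD_of_not_contains d [] hf]

-- A's whole loop is a modify-fold over (short, doc) pairs.
theorem aFold_eq (kb : List (List (String × String))) :
    (kb.foldl (fun d doc =>
        let short := shortOf doc
        if d.contains short then d.modify short [] (· ++ [doc])
        else d.insert short [doc]) PySem.Dict.empty) =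
      ((kb.map (fun doc => (shortOf doc, doc))).foldl
        (fun d p => d.modify p.1 [] (· ++ [p.2])) PySem.Dict.empty) := by
  rw [List.foldl_map]
  exact PySem.List.foldl_congr_mem kb _ _ _ (fun d doc _ => step_eq_modify d (shortOf doc) doc)

theorem get_kb_documents_by_error_spec : Claim_equal_get_kb_documents_by_error := by
  intro kb _ _
  unfold Spec_get_kb_documents_by_error get_kb_documents_by_error get_kb_documents_by_error_alt
  rw [aFold_eq]
  have hnd : ((kb.map (fun doc => (shortOf doc, doc))).foldl
      (fun d p => d.modify p.1 [] (· ++ [p.2])) PySem.Dict.empty).keys.Nodup := by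
    rw [List.foldl_map]
    exact PySem.Dict.nodup_keys_foldl_modify_key kb shortOf []
      (fun _ doc => (· ++ [doc])) PySem.Dict.empty (by simp)
  rw [PySem.Dict.items_eq_map_keys _ hnd []]
  -- keys of both sides are the ordered dedup of the shorts
  have hkeysA : ((kb.map (fun doc => (shortOf doc, doc))).foldl
      (fun d p => d.modify p.1 [] (· ++ [p.2])) PySem.Dict.empty).keys
      = PySem.Set.ofList (kb.map shortOf) := by
    rw [List.foldl_map]
    rw [PySem.Dict.keys_foldl_modify_key kb shortOf [] (fun _ doc => (· ++ [doc]))]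
    simp [PySem.Set.update_nil_left]
  have hkeysB : kb.foldl (fun ks doc => PySem.Set.add ks (shortOf doc)) ([] : PySem.Set String)
      = PySem.Set.ofList (kb.map shortOf) := by
    rw [← PySem.Set.update_map_eq_foldl_add, PySem.Set.update_nil_left]
  rw [hkeysA, hkeysB]
  refine List.map_congr_left (fun k _ => ?_)
  rw [PySem.Dict.getD_foldl_modify_append]
  simp [PySem.Dict.getD_empty, List.filter_map, Function.comp_def]
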